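-- pv_equiv track=rewrite | github.com/MPUSP/lautenschlaeger_silent_sites | silent_sites_analysis.py | ident_zero_stretches
-- ===== SOURCE A (Python) =====
-- def ident_zero_stretches(mask):
--     stretches = []
--     start = None
--     for i, val in enumerate(mask):
--         if not val and start is None:
--             start = i
--         elif val and start is not None:
--             if i-1 > start:
--                 stretches.append((start, i-1))
--             start = None
--     if start is not None:
--         if len(mask)-1 > start:
--             stretches.append((start, len(mask)-1))
--     return stretches
-- ===== SOURCE B (Python) =====
-- def ident_zero_stretches(mask):
--     # Run-based scan: jump over whole maximal runs of equal truthiness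
--     # instead of per-element start/None state tracking.
--     stretches = []
--     i, n = 0, len(mask)
--     while i < n:
--         falsy = not mask[i]
--         j = i
--         while j < n and (not mask[j]) == falsy:
--             j += 1
--         if falsy and j - i > 1:
--             stretches.append((i, j - 1))
--         i = j
--     return stretches
-- ===== Notes on version B (the rewrite author's own statement) =====
-- stated objective: idiomatic
-- what changed: B scans maximal runs of equal truthiness directly (two-level run scan, emitting a falsy run longer than 1 as it is found) instead of A's per-element state machine with a start/None sentinel and post-loop flush.
import Mathlib
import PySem

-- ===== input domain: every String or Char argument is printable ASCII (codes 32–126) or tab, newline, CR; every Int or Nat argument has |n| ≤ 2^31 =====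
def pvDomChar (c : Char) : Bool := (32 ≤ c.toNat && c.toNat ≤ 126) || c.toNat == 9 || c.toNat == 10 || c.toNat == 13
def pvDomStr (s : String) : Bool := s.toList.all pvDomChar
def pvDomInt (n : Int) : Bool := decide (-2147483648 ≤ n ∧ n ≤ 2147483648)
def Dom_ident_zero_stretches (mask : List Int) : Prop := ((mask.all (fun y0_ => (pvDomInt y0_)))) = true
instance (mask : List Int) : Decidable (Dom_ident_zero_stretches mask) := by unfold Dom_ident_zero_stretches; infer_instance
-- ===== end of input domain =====

-- B replaces A's per-element start/None state machine by a direct scan over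
-- maximal runs of equal truthiness (an alternative run-based decomposition; same cost).

-- ===== PORT A =====
-- the for-loop over enumerate(mask) with state (stretches, start)
def identAgo : List (Int × Int) → List (Int × Int) → Option Int → List (Int × Int) × Option Int
  | [], stretches, start => (stretches, start)
  | (i, val) :: rest, stretches, start =>
    if val = 0 then
      match start with
      | none => identAgo rest stretches (some i)      -- not val and start is None
      | some _ => identAgo rest stretches start       -- fall through
    else
      match start with
      | some s =>                                     -- val and start is not None
        identAgo rest (if i - 1 > s then stretches ++ [(s, i - 1)] else stretches) none
      | none => identAgo rest stretches none          -- fall through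

def ident_zero_stretches (mask : List Int) : List (Int × Int) :=
  let r := identAgo (PySem.List.enumerate mask 0) [] none
  match r.2 with
  | some s =>
    if (mask.length : Int) - 1 > s then r.1 ++ [(s, (mask.length : Int) - 1)] else r.1
  | none => r.1

-- ===== PORT B =====
-- outer while: recursion on the remaining suffix; inner while j: the maximal
-- run of equal truthiness at the front (takeWhile/dropWhile of the suffix)
def identBgo : List Int → Int → List (Int × Int)
  | [], _ => []
  | v :: rest, i =>
    let falsy := v == 0
    let run := List.takeWhile (fun x => (x == 0) == falsy) (v :: rest)
    let tail := List.dropWhile (fun x => (x == 0) == falsy) (v :: rest)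
    (if falsy && decide (run.length > 1) then [(i, i + (run.length : Int) - 1)] else [])
      ++ identBgo tail (i + (run.length : Int))
termination_by l _ => l.length
decreasing_by
  simp only [List.dropWhile, BEq.rfl]
  exact Nat.lt_succ_of_le (List.length_dropWhile_le _ _)

def ident_zero_stretches_alt (mask : List Int) : List (Int × Int) := identBgo mask 0

-- ===== PRECONDITION & SPEC =====
def Spec_ident_zero_stretches (mask : List Int) (out : List (Int × Int)) : Prop := out = ident_zero_stretches_alt mask
instance (mask : List Int) (out : List (Int × Int)) : Decidable (Spec_ident_zero_stretches mask out) := by unfold Spec_ident_zero_stretches; infer_instance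

-- ===== CLAIM (what is proved, stated in full; the proofs are below) =====
def Claim_equal_ident_zero_stretches : Prop := ∀ (mask : List Int), Dom_ident_zero_stretches mask → Spec_ident_zero_stretches mask (ident_zero_stretches mask)

-- ===== LEMMAS AND PROOFS =====

-- the accumulator only ever grows on the right
theorem identAgo_acc (l : List (Int × Int)) (acc : List (Int × Int)) (st : Option Int) :
    identAgo l acc st = (acc ++ (identAgo l [] st).1, (identAgo l [] st).2) := by
  induction l generalizing acc st with
  | nil => simp [identAgo]
  | cons p rest ih =>
    obtain ⟨i, val⟩ := p
    by_cases hv : val = 0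
    · cases st with
      | none =>
        simp only [identAgo, if_pos hv]
        exact ih acc (some i)
      | some s =>
        simp only [identAgo, if_pos hv]
        exact ih acc (some s)
    · cases st with
      | none =>
        simp only [identAgo, if_neg hv]
        exact ih acc none
      | some s =>
        simp only [identAgo, if_neg hv, List.nil_append]
        by_cases hc : i - 1 > s
        · rw [if_pos hc, if_pos hc, ih (acc ++ [(s, i - 1)]) none, ih [(s, i - 1)] none]
          simp
        · rw [if_neg hc, if_neg hc]
          exact ih acc none

-- a run of nonzero values with no open stretch is a no-op
theorem identAgo_skip (l : List Int) (h : ∀ x ∈ l, ¬ x = 0) :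
    ∀ (more : List (Int × Int)) (acc : List (Int × Int)) (s : Int),
    identAgo (PySem.List.enumerate l s ++ more) acc none = identAgo more acc none := by
  induction l with
  | nil => simp [PySem.List.enumerate_nil]
  | cons v rest ih =>
    intro more acc s
    have hv : ¬ v = 0 := h v List.mem_cons_self
    rw [PySem.List.enumerate_cons]
    simp only [List.cons_append, identAgo, if_neg hv]
    exact ih (fun x hx => h x (List.mem_cons_of_mem _ hx)) more acc (s + 1)

-- a run of zero values with an open stretch is a no-op
theorem identAgo_zeros (l : List Int) (h : ∀ x ∈ l, x = 0) :
    ∀ (more : List (Int × Int)) (acc : List (Int × Int)) (j s : Int),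
    identAgo (PySem.List.enumerate l j ++ more) acc (some s) = identAgo more acc (some s) := by
  induction l with
  | nil => simp [PySem.List.enumerate_nil]
  | cons v rest ih =>
    intro more acc j s
    have hv : v = 0 := h v List.mem_cons_self
    rw [PySem.List.enumerate_cons]
    simp only [List.cons_append, identAgo, if_pos hv]
    exact ih (fun x hx => h x (List.mem_cons_of_mem _ hx)) more acc (j + 1) s

-- A's whole computation started at offset i on a suffix
def Ago (i : Int) (mask : List Int) : List (Int × Int) :=
  match identAgo (PySem.List.enumerate mask i) [] none with
  | (st, some s) => if i + (mask.length : Int) - 1 > s then st ++ [(s, i + (mask.length : Int) - 1)] else st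
  | (st, none) => st

theorem Ago_zero (mask : List Int) : ident_zero_stretches mask = Ago 0 mask := by
  unfold ident_zero_stretches Ago
  rcases hr : identAgo (PySem.List.enumerate mask 0) [] none with ⟨st, s⟩
  cases s <;> simp

-- if the identAgo pairs agree and the flush bounds agree, the finalizations agree
theorem Ago_congr (i j : Int) (mask tail : List Int) (e : List (Int × Int))
    (hpair : identAgo (PySem.List.enumerate mask i) [] none
      = (e ++ (identAgo (PySem.List.enumerate tail j) [] none).1,
         (identAgo (PySem.List.enumerate tail j) [] none).2))
    (hb : i + (mask.length : Int) - 1 = j + (tail.length : Int) - 1) :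
    Ago i mask = e ++ Ago j tail := by
  unfold Ago
  rcases hq : identAgo (PySem.List.enumerate tail j) [] none with ⟨st, s⟩
  rw [hq] at hpair
  rw [hpair, hb]
  cases s with
  | none => rfl
  | some s0 =>
    dsimp only
    by_cases hc : j + (tail.length : Int) - 1 > s0
    · rw [if_pos hc, if_pos hc, List.append_assoc]
    · rw [if_neg hc, if_neg hc]

theorem main_lemma : ∀ (n : Nat) (mask : List Int), mask.length ≤ n → ∀ (i : Int), Ago i mask = identBgo mask i := by
  intro n
  induction n with
  | zero =>
    intro mask hlen i
    have : mask = [] := List.eq_nil_of_length_eq_zero (Nat.le_zero.mp hlen)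
    subst this
    simp [Ago, identBgo, PySem.List.enumerate_nil, identAgo]
  | succ m ih =>
    intro mask hlen i
    match mask with
    | [] => simp [Ago, identBgo, PySem.List.enumerate_nil, identAgo]
    | v :: rest =>
      set p : Int → Bool := fun x => (x == 0) == (v == 0) with hp
      have hpv : p v = true := by simp [hp]
      set run := List.takeWhile p (v :: rest) with hrun
      set tail := List.dropWhile p (v :: rest) with htail
      have hsplit : run ++ tail = v :: rest := List.takeWhile_append_dropWhile
      have htail' : tail = List.dropWhile p rest := by
        rw [htail, List.dropWhile_cons, if_pos hpv]
      have hrest : rest.length ≤ m := by simpa using hlen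
      have htlen : tail.length ≤ m := by
        rw [htail']; exact le_trans (List.length_dropWhile_le p rest) hrest
      have hlen2 : (v :: rest).length = run.length + tail.length := by
        rw [← hsplit, List.length_append]
      have hrun_ne : run ≠ [] := by
        rw [hrun, List.takeWhile_cons, if_pos hpv]; simp
      have hrunpos : 1 ≤ run.length := by
        cases hr : run with
        | nil => exact absurd hr hrun_ne
        | cons a b => simp
      have hrun_all : ∀ x ∈ run, p x = true := fun x hx => List.mem_takeWhile_imp hx
      have hidx : i + ((v :: rest).length : Int) - 1
          = (i + (run.length : Int)) + ((tail.length : Int)) - 1 := by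
        rw [hlen2]; push_cast; ring
      have hBunfold : identBgo (v :: rest) i
          = (if (v == 0) && decide (run.length > 1) then [(i, i + (run.length : Int) - 1)] else [])
            ++ identBgo tail (i + (run.length : Int)) := by
        rw [identBgo]
      by_cases hv : v = 0
      · -- falsy run: open at i, swallow zeros, close at the end of the run
        have hvb : (v == 0) = true := by simp [hv]
        have hrun_zero : ∀ x ∈ run, x = 0 := by
          intro x hx
          have := hrun_all x hx
          simp [hp, hvb] at this
          exact this
        obtain ⟨run', hrun'⟩ : ∃ run', run = v :: run' := by
          rw [hrun, List.takeWhile_cons, if_pos hpv]; exact ⟨_, rfl⟩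
        have hA1 : ∀ more acc, identAgo (PySem.List.enumerate (v :: rest) i ++ more) acc none
            = identAgo (PySem.List.enumerate tail (i + (run.length : Int)) ++ more) acc (some i) := by
          intro more acc
          conv_lhs => rw [← hsplit]
          rw [PySem.List.enumerate_append, hrun', PySem.List.enumerate_cons]
          simp only [List.cons_append, identAgo, if_pos hv, List.append_assoc]
          have hz' : ∀ x ∈ run', x = 0 := fun x hx => hrun_zero x (hrun' ▸ List.mem_cons_of_mem _ hx)
          rw [identAgo_zeros run' hz' _ acc (i + 1) i]
        cases htc : tail with
        | nil =>
          -- the whole suffix is one zero run; A flushes after the loop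
          have hA2 : identAgo (PySem.List.enumerate (v :: rest) i) [] none = ([], some i) := by
            have := hA1 [] []
            simp only [List.append_nil] at this
            rw [this, htc, PySem.List.enumerate_nil]; rfl
          have hlen3 : ((v :: rest).length : Int) = (run.length : Int) := by
            rw [hlen2, htc]; simp
          rw [Ago, hA2, hBunfold]
          simp only [htc, identBgo, List.append_nil, hvb, Bool.true_and]
          by_cases hgt : 1 < run.length
          · rw [if_pos (by omega : i + ((v :: rest).length : Int) - 1 > i),
              if_pos (by simpa using hgt)]
            rw [hlen3]; simp
          · rw [if_neg (by omega : ¬ i + ((v :: rest).length : Int) - 1 > i),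
              if_neg (by simpa using hgt)]
        | cons w ws =>
          -- the run is closed by the first non-falsy element w
          have hpw : p w = false := by
            have hid : tail.dropWhile p = tail := by rw [htail, List.dropWhile_idempotent]
            rw [htc] at hid
            by_contra hc
            rw [List.dropWhile_cons, if_pos (by revert hc; cases p w <;> simp)] at hid
            have h1 := congrArg List.length hid
            have h2 := List.length_dropWhile_le p ws
            simp at h1
            omega
          have hw : ¬ w = 0 := by
            intro h0
            rw [hp] at hpw; simp [h0, hvb] at hpw
          -- A's state after the run and the closing step
          have hA2 : identAgo (PySem.List.enumerate (v :: rest) i) [] none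
              = identAgo (PySem.List.enumerate ws (i + (run.length : Int) + 1))
                  (if i + (run.length : Int) - 1 > i then [(i, i + (run.length : Int) - 1)] else []) none := by
            have := hA1 [] []
            simp only [List.append_nil] at this
            rw [this, htc, PySem.List.enumerate_cons]
            simp only [identAgo, if_neg hw, List.nil_append]
          have hB2 : identAgo (PySem.List.enumerate tail (i + (run.length : Int))) [] none
              = identAgo (PySem.List.enumerate ws (i + (run.length : Int) + 1)) [] none := by
            rw [htc, PySem.List.enumerate_cons]
            simp only [identAgo, if_neg hw]
          have hpair : identAgo (PySem.List.enumerate (v :: rest) i) [] none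
              = ((if i + (run.length : Int) - 1 > i then [(i, i + (run.length : Int) - 1)] else [])
                  ++ (identAgo (PySem.List.enumerate tail (i + (run.length : Int))) [] none).1,
                 (identAgo (PySem.List.enumerate tail (i + (run.length : Int))) [] none).2) := by
            rw [hA2, hB2, identAgo_acc]
          rw [← htc] at *
          rw [Ago_congr i (i + (run.length : Int)) (v :: rest) tail _ hpair hidx,
            ih tail htlen (i + (run.length : Int)), hBunfold]
          congr 1
          simp only [hvb, Bool.true_and]
          by_cases hgt : 1 < run.length
          · rw [if_pos (by omega : i + (run.length : Int) - 1 > i), if_pos (by simpa using hgt)]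
          · rw [if_neg (by omega : ¬ i + (run.length : Int) - 1 > i), if_neg (by simpa using hgt)]
      · -- truthy run: a no-op for A, nothing emitted by B
        have hvb : (v == 0) = false := by simp [hv]
        have hrun_nz : ∀ x ∈ run, ¬ x = 0 := by
          intro x hx h0
          have := hrun_all x hx
          simp [hp, hvb, h0] at this
        have hpair : identAgo (PySem.List.enumerate (v :: rest) i) [] none
            = ([] ++ (identAgo (PySem.List.enumerate tail (i + (run.length : Int))) [] none).1,
               (identAgo (PySem.List.enumerate tail (i + (run.length : Int))) [] none).2) := by
          conv_lhs => rw [← hsplit]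
          rw [PySem.List.enumerate_append, identAgo_skip run hrun_nz]
          simp
        rw [Ago_congr i (i + (run.length : Int)) (v :: rest) tail [] hpair hidx,
          ih tail htlen (i + (run.length : Int)), hBunfold]
        simp [hvb]

-- ===== VERDICT (by name: the statement is the Claim_ definition above) =====
theorem ident_zero_stretches_spec : Claim_equal_ident_zero_stretches := by
  intro mask _
  unfold Spec_ident_zero_stretches ident_zero_stretches_alt
  rw [Ago_zero]
  exact main_lemma mask.length mask le_rfl 0
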